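-- pv_equiv track=rewrite | github.com/FX196/Code-Learning | Python/Kick Start 2019/Round A/A.py | solve
-- ===== SOURCE A (Python) =====
-- def solve(n, p, s):
--     min_cost = 10000 * 10 ** 5
--     skills = set(s)
--     for person in skills:
--         sublist = list(filter(lambda x: x <= person, s))
--         if len(sublist) < p:
--             continue
--         sublist.sort(reverse=True)
--         min_cost = min(min_cost, person * p - sum(sublist[:p]))
--     return min_cost
-- ===== SOURCE B (Python) =====
-- def solve(n, p, s):
--     min_cost = 10000 * 10 ** 5
--     t = sorted(s)
--     prefix = [0]
--     for x in t:
--         prefix.append(prefix[-1] + x)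
--     for i in range(p - 1, len(t)):
--         min_cost = min(min_cost, t[i] * p - (prefix[i + 1] - prefix[i + 1 - p]))
--     return min_cost
-- ===== Notes on version B (the rewrite author's own statement) =====
-- stated objective: faster
-- what changed: A filters and descending-sorts the whole list once per distinct skill value; B sorts once, builds prefix sums, and takes the minimum of person*p - window_sum over all p-length windows of the sorted list.
-- outside the precondition, e.g. on solve(1, -1, [5]): A returns -5, B raises IndexError; on solve(0, 0, []): A returns 1000000000, B raises IndexError; on solve(1, 0, [5]): A returns 0, B returns 0
import Mathlib
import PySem

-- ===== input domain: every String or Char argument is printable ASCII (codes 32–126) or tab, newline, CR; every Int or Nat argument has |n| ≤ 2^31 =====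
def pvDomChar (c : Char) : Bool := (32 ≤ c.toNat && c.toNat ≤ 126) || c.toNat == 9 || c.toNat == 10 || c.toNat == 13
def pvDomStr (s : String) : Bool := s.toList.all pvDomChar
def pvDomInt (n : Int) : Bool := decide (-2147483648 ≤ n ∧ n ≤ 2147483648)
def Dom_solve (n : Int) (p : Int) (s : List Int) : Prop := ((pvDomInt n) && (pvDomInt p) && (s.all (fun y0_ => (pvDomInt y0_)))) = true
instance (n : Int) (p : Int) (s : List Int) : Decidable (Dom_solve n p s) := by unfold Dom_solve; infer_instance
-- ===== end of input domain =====

-- B replaces A's per-distinct-value filter+sort (O(n^2 log n)) by one sort plus a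
-- prefix-sum sliding window over p-length windows (O(n log n)); objective: faster.

-- ===== PORT A =====
def solve (n : Int) (p : Int) (s : List Int) : Int :=
  (PySem.Set.ofList s).foldl
    (fun min_cost person =>
      let sublist := s.filter (fun x => decide (x ≤ person))
      if (sublist.length : Int) < p then min_cost
      else
        min min_cost
          (person * p -
            (PySem.List.slice (PySem.List.sorted sublist (fun x => x) true) none (some p)).sum))
    (10000 * 10 ^ 5)

-- ===== PORT B =====
-- pyGetD (default 0) is exact here: under Pre_solve every index B uses is in range.
def solve_alt (n : Int) (p : Int) (s : List Int) : Int :=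
  let t := PySem.List.sorted s (fun x => x)
  let pre := t.foldl (fun pf x => pf ++ [PySem.List.pyGetD pf (-1) 0 + x]) [0]
  (PySem.List.pyRange (p - 1) (t.length : Int)).foldl
    (fun mc i =>
      min mc
        (PySem.List.pyGetD t i 0 * p -
          (PySem.List.pyGetD pre (i + 1) 0 - PySem.List.pyGetD pre (i + 1 - p) 0)))
    (10000 * 10 ^ 5)

-- ===== PRECONDITION & SPEC =====
-- Pre_ excludes p <= 0: in this problem p is the number of people to teach, a positive
-- count; for p <= 0 A's negative slice sublist[:p] yields accidental values while B's
-- window indexing raises IndexError.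
def Pre_solve (n : Int) (p : Int) (s : List Int) : Prop := 1 ≤ p
instance (n : Int) (p : Int) (s : List Int) : Decidable (Pre_solve n p s) := by unfold Pre_solve; infer_instance
def pvWitness_solve : Int × Int × List Int := (4, 2, [3, 7, 7, 2])

def Spec_solve (n : Int) (p : Int) (s : List Int) (out : Int) : Prop := out = solve_alt n p s
instance (n : Int) (p : Int) (s : List Int) (out : Int) : Decidable (Spec_solve n p s out) := by unfold Spec_solve; infer_instance

-- ===== CLAIM (what is proved, stated in full; the proofs are below) =====
def Claim_equal_solve : Prop := ∀ (n : Int) (p : Int) (s : List Int), Dom_solve n p s → Pre_solve n p s → Spec_solve n p s (solve n p s)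

-- ===== LEMMAS AND PROOFS =====

-- abbreviations used only by the proofs
def pvT (s : List Int) : List Int := PySem.List.sorted s (fun x => x)
def pvPre (s : List Int) : List Int :=
  (pvT s).foldl (fun pf x => pf ++ [PySem.List.pyGetD pf (-1) 0 + x]) [0]
def pvS (s : List Int) (k : Nat) : Int := ((pvT s).take k).sum
def pvGA (p : Int) (s : List Int) (v : Int) : Int :=
  v * p -
    (PySem.List.slice (PySem.List.sorted (s.filter (fun x => decide (x ≤ v))) (fun x => x) true)
      none (some p)).sum
def pvCA (p : Int) (s : List Int) (v : Int) : Bool :=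
  decide (((s.filter (fun x => decide (x ≤ v))).length : Int) < p)
def pvGB (p : Int) (s : List Int) (i : Int) : Int :=
  PySem.List.pyGetD (pvT s) i 0 * p -
    (PySem.List.pyGetD (pvPre s) (i + 1) 0 - PySem.List.pyGetD (pvPre s) (i + 1 - p) 0)


theorem pv_foldl_min_char {α : Type} (g : α → Int) (c : α → Bool) (l : List α) (init : Int) :
    l.foldl (fun acc x => if c x then acc else min acc (g x)) init ≤ init ∧
    (∀ x ∈ l, c x = false → l.foldl (fun acc x => if c x then acc else min acc (g x)) init ≤ g x) ∧
    (l.foldl (fun acc x => if c x then acc else min acc (g x)) init = init ∨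
      ∃ x ∈ l, c x = false ∧ l.foldl (fun acc x => if c x then acc else min acc (g x)) init = g x) := by
  induction l generalizing init with
  | nil => simp
  | cons y ys ih =>
    simp only [List.foldl_cons]
    by_cases hc : c y
    · simp only [hc]
      rcases ih init with ⟨h1, h2, h3⟩
      refine ⟨h1, ?_, ?_⟩
      · intro x hx hcx
        rcases List.mem_cons.mp hx with hx | hx
        · subst hx; simp [hc] at hcx
        · exact h2 x hx hcx
      · rcases h3 with h | ⟨x, hx, hcx, he⟩
        · exact Or.inl h
        · exact Or.inr ⟨x, List.mem_cons_of_mem _ hx, hcx, he⟩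
    · simp only [if_neg hc]
      rcases ih (min init (g y)) with ⟨h1, h2, h3⟩
      have hinit : min init (g y) ≤ init := min_le_left _ _
      have hgy : min init (g y) ≤ g y := min_le_right _ _
      refine ⟨le_trans h1 hinit, ?_, ?_⟩
      · intro x hx hcx
        rcases List.mem_cons.mp hx with hx | hx
        · subst hx; exact le_trans h1 hgy
        · exact h2 x hx hcx
      · rcases h3 with h | ⟨x, hx, hcx, he⟩
        · by_cases hle : init ≤ g y
          · left; rw [h]; exact min_eq_left hle
          · right
            refine ⟨y, List.mem_cons_self, Bool.of_not_eq_true hc, ?_⟩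
            rw [h]; exact min_eq_right (le_of_not_ge hle)
        · exact Or.inr ⟨x, List.mem_cons_of_mem _ hx, hcx, he⟩

theorem solve_eq_fold (n p : Int) (s : List Int) :
    solve n p s =
      (PySem.Set.ofList s).foldl
        (fun acc v => if pvCA p s v then acc else min acc (pvGA p s v)) (10000 * 10 ^ 5) := by
  simp only [solve, pvCA, pvGA, decide_eq_true_eq]

theorem solve_alt_eq_fold (n p : Int) (s : List Int) :
    solve_alt n p s =
      (PySem.List.pyRange (p - 1) ((pvT s).length : Int)).foldl
        (fun acc i => if (fun _ : Int => false) i then acc else min acc (pvGB p s i)) (10000 * 10 ^ 5) := by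
  simp only [solve_alt, pvGB, pvT, pvPre, Bool.false_eq_true, if_false]

-- prefix characterization
theorem pv_build_go (t : List Int) (acc : List Int) (c : Int)
    (h : PySem.List.pyGetD acc (-1) 0 = c) :
    t.foldl (fun pf x => pf ++ [PySem.List.pyGetD pf (-1) 0 + x]) acc
      = acc ++ (List.range t.length).map (fun k => c + (t.take (k + 1)).sum) := by
  induction t generalizing acc c with
  | nil => simp
  | cons x ts ih =>
    simp only [List.foldl_cons, h]
    rw [ih (acc ++ [c + x]) (c + x) (by simp [PySem.List.pyGetD])]
    rw [List.length_cons, List.range_succ_eq_map]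
    simp only [List.map_cons, List.map_map, List.append_assoc]
    simp only [List.singleton_append]
    congr 1
    congr 1
    · simp
    · congr 1
      funext k
      simp only [Function.comp_apply, List.take_succ_cons, List.sum_cons]
      ring

theorem pvPre_eq (s : List Int) :
    pvPre s = (List.range ((pvT s).length + 1)).map (fun k => pvS s k) := by
  rw [pvPre, pv_build_go (pvT s) [0] 0 (by rfl)]
  rw [List.range_succ_eq_map]
  simp only [List.map_cons, List.map_map]
  simp only [List.singleton_append, List.cons.injEq]
  constructor
  · simp [pvS]
  · congr 1
    funext k
    simp [pvS]

theorem pvT_pairwise (s : List Int) : List.Pairwise (· ≤ ·) (pvT s) :=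
  PySem.List.sorted_pairwise s (fun x => x)

theorem pvT_perm (s : List Int) : (pvT s).Perm s :=
  PySem.List.sorted_perm s (fun x => x) false

-- in a sorted list the elements ≤ v form the prefix of length countP
theorem pv_filter_eq_take (t : List Int) (v : Int) (h : List.Pairwise (· ≤ ·) t) :
    t.filter (fun x => decide (x ≤ v)) = t.take (t.countP (fun x => decide (x ≤ v))) := by
  induction t with
  | nil => simp
  | cons y ys ih =>
    rcases List.pairwise_cons.mp h with ⟨hy, hys⟩
    by_cases hv : y ≤ v
    · simp only [List.filter_cons, List.countP_cons, hv, decide_true, if_pos, List.take_succ_cons]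
      rw [ih hys]
    · have hall : ∀ x ∈ ys, ¬ (x ≤ v) := fun x hx hxv => hv (le_trans (hy x hx) hxv)
      have h1 : (y :: ys).filter (fun x => decide (x ≤ v)) = [] := by
        simp only [List.filter_eq_nil_iff]
        intro x hx
        rcases List.mem_cons.mp hx with hx | hx
        · subst hx; simpa using hv
        · simpa using hall x hx
      have h2 : (y :: ys).countP (fun x => decide (x ≤ v)) = 0 := by
        rw [List.countP_eq_length_filter, h1]; rfl
      rw [h1, h2]; rfl

-- A's descending sort of the ≤-v sublist is the reverse of a prefix of pvT s
theorem pv_desc_sort_eq (s : List Int) (v : Int) :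
    PySem.List.sorted (s.filter (fun x => decide (x ≤ v))) (fun x => x) true
      = ((pvT s).filter (fun x => decide (x ≤ v))).reverse := by
  apply List.Perm.eq_of_pairwise (le := fun a b : Int => b ≤ a)
  · intro a b _ _ h1 h2; exact le_antisymm h2 h1
  · exact PySem.List.sorted_pairwise_rev _ _
  · rw [List.pairwise_reverse]
    exact List.Pairwise.filter _ (pvT_pairwise s)
  · exact ((PySem.List.sorted_perm _ _ _).trans ((pvT_perm s).filter _).symm).trans
      (List.reverse_perm _).symm

-- number of elements ≤ v in pvT s
def pvM (s : List Int) (v : Int) : Nat := (pvT s).countP (fun x => decide (x ≤ v))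

theorem pvM_le_len (s : List Int) (v : Int) : pvM s v ≤ (pvT s).length :=
  List.countP_le_length

theorem pvT_filter_take (s : List Int) (v : Int) :
    (pvT s).filter (fun x => decide (x ≤ v)) = (pvT s).take (pvM s v) :=
  pv_filter_eq_take (pvT s) v (pvT_pairwise s)

theorem pvT_mono (s : List Int) {a b : Nat} (hab : a ≤ b) (hb : b < (pvT s).length) :
    (pvT s)[a]'(lt_of_le_of_lt hab hb) ≤ (pvT s)[b] :=
  PySem.List.sorted_id_getElem_mono s hab hb

-- value of A's candidate as prefix sums
theorem pv_sum_slice (s : List Int) (v : Int) (p : Int) (hp : 1 ≤ p)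
    (hpm : p ≤ (pvM s v : Int)) :
    (PySem.List.slice (PySem.List.sorted (s.filter (fun x => decide (x ≤ v))) (fun x => x) true)
        none (some p)).sum = pvS s (pvM s v) - pvS s (pvM s v - p.toNat) := by
  rw [pv_desc_sort_eq, pvT_filter_take]
  rw [PySem.List.slice_to _ (by omega)]
  rw [List.take_reverse, List.sum_reverse]
  have hm : ((pvT s).take (pvM s v)).length = pvM s v := by
    rw [List.length_take]
    exact min_eq_left (pvM_le_len s v)
  rw [hm]
  have hsum : (((pvT s).take (pvM s v)).take (pvM s v - p.toNat)).sum
      + (((pvT s).take (pvM s v)).drop (pvM s v - p.toNat)).sum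
      = ((pvT s).take (pvM s v)).sum := by
    rw [← List.sum_append, List.take_append_drop]
  have htt : ((pvT s).take (pvM s v)).take (pvM s v - p.toNat)
      = (pvT s).take (pvM s v - p.toNat) := by
    rw [List.take_take]
    congr 1
    omega
  rw [htt] at hsum
  simp only [pvS]
  omega

-- the last element of the ≤-v prefix is v itself
theorem pvM_pos (s : List Int) (v : Int) (hv : v ∈ pvT s) : 1 ≤ pvM s v := by
  rw [pvM]
  have : 0 < (pvT s).countP (fun x => decide (x ≤ v)) :=
    List.countP_pos_iff.mpr ⟨v, hv, by simp⟩
  omega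

theorem pvT_getElem_M (s : List Int) (v : Int) (hv : v ∈ pvT s) :
    (pvT s)[pvM s v - 1]'(by
      have ha := pvM_le_len s v
      have hb := pvM_pos s v hv
      omega) = v := by
  have h1 := pvM_pos s v hv
  have h2 := pvM_le_len s v
  have hft := pvT_filter_take s v
  have hle : (pvT s)[pvM s v - 1]'(by omega) ≤ v := by
    have hmem : (pvT s)[pvM s v - 1]'(by omega) ∈ (pvT s).take (pvM s v) :=
      List.mem_take_iff_getElem.mpr ⟨pvM s v - 1, by omega, rfl⟩
    rw [← hft] at hmem
    have := List.of_mem_filter hmem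
    simpa using this
  have hge : v ≤ (pvT s)[pvM s v - 1]'(by omega) := by
    have hmem : v ∈ (pvT s).take (pvM s v) := by
      rw [← hft]
      exact List.mem_filter.mpr ⟨hv, by simp⟩
    rcases List.mem_take_iff_getElem.mp hmem with ⟨j, hj, hjv⟩
    have hmono := pvT_mono s (a := j) (b := pvM s v - 1) (by omega) (by omega)
    rw [hjv] at hmono
    exact hmono
  exact le_antisymm hle hge

-- every index j has at least j+1 elements ≤ t[j]
theorem pvM_ge (s : List Int) (j : Nat) (hj : j < (pvT s).length) :
    j + 1 ≤ pvM s ((pvT s)[j]) := by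
  obtain ⟨v, hv⟩ : ∃ v, (pvT s)[j] = v := ⟨_, rfl⟩
  rw [hv]
  have hall : ((pvT s).take (j+1)).countP (fun x => decide (x ≤ v)) = j + 1 := by
    have hlen : ((pvT s).take (j+1)).length = j + 1 := by
      rw [List.length_take]; omega
    have hcp : ((pvT s).take (j+1)).countP (fun x => decide (x ≤ v))
        = ((pvT s).take (j+1)).length := by
      apply List.countP_eq_length.mpr
      intro a ha
      rcases List.mem_take_iff_getElem.mp ha with ⟨i, hi, hiv⟩
      simp only [decide_eq_true_eq]
      have hmono := pvT_mono s (a := i) (b := j) (by omega) hj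
      rw [hiv, hv] at hmono
      exact hmono
    rw [hcp, hlen]
  have hsub : (pvT s).countP (fun x => decide (x ≤ v))
      ≥ ((pvT s).take (j+1)).countP (fun x => decide (x ≤ v)) := by
    conv_lhs => rw [← List.take_append_drop (j+1) (pvT s)]
    rw [List.countP_append]
    omega
  rw [pvM]
  omega

-- window sums are monotone along a sorted list
theorem pv_window_mono (s : List Int) (pp : Nat) (d a : Nat)
    (h : a + d + pp ≤ (pvT s).length) :
    pvS s (a + pp) - pvS s a ≤ pvS s (a + d + pp) - pvS s (a + d) := by
  induction d with
  | zero => simp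
  | succ e ih =>
    have hstep : pvS s (a + e + pp) - pvS s (a + e) ≤ pvS s (a + (e+1) + pp) - pvS s (a + (e+1)) := by
      have h1 : pvS s (a + (e+1) + pp) = pvS s (a + e + pp) + (pvT s)[a + e + pp]'(by omega) := by
        have : a + (e+1) + pp = (a + e + pp) + 1 := by omega
        rw [this, pvS, pvS, List.sum_take_succ _ _ (by omega)]
      have h2 : pvS s (a + (e+1)) = pvS s (a + e) + (pvT s)[a + e]'(by omega) := by
        have : a + (e+1) = (a + e) + 1 := by omega
        rw [this, pvS, pvS, List.sum_take_succ _ _ (by omega)]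
      have h3 : (pvT s)[a + e]'(by omega) ≤ (pvT s)[a + e + pp]'(by omega) :=
        pvT_mono s (by omega) (by omega)
      omega
    exact le_trans (ih (by omega)) hstep

theorem pvPre_getD (s : List Int) (j : Int) (h0 : 0 ≤ j) (h1 : j ≤ ((pvT s).length : Int)) :
    PySem.List.pyGetD (pvPre s) j 0 = pvS s j.toNat := by
  rw [pvPre_eq]
  rw [PySem.List.pyGetD_eq_getElem _ _ h0 (by
    rw [List.length_map, List.length_range]; omega)]
  simp

theorem pvGB_eval (s : List Int) (p i : Int) (hp : 1 ≤ p) (hi : p - 1 ≤ i)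
    (hilen : i < ((pvT s).length : Int)) :
    pvGB p s i = (pvT s)[i.toNat]'(by omega) * p
      - (pvS s (i.toNat + 1) - pvS s (i.toNat + 1 - p.toNat)) := by
  have e1 : (i + 1).toNat = i.toNat + 1 := by omega
  have e2 : (i + 1 - p).toNat = i.toNat + 1 - p.toNat := by omega
  rw [pvGB, PySem.List.pyGetD_eq_getElem _ _ (by omega) hilen,
      pvPre_getD s (i + 1) (by omega) (by omega),
      pvPre_getD s (i + 1 - p) (by omega) (by omega), e1, e2]

theorem pv_main (n p : Int) (s : List Int) (hp : 1 ≤ p) : solve n p s = solve_alt n p s := by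
  rw [solve_eq_fold, solve_alt_eq_fold]
  obtain ⟨A1, A2, A3⟩ := pv_foldl_min_char (pvGA p s) (pvCA p s) (PySem.Set.ofList s) (10000 * 10 ^ 5)
  obtain ⟨B1, B2, B3⟩ := pv_foldl_min_char (pvGB p s) (fun _ : Int => false)
    (PySem.List.pyRange (p - 1) ((pvT s).length : Int)) (10000 * 10 ^ 5)
  have hlenp : ∀ v : Int, (s.filter (fun x => decide (x ≤ v))).length = pvM s v := by
    intro v
    rw [pvM, ← List.countP_eq_length_filter]
    exact (List.Perm.countP_eq _ (pvT_perm s)).symm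
  apply le_antisymm
  · -- A's result ≤ B's result
    rcases B3 with hB | ⟨i, hi, -, hB⟩
    · rw [hB]; exact A1
    · rw [hB]
      rcases PySem.List.mem_pyRange_one.mp hi with ⟨hi1, hi2⟩
      have hjlen : i.toNat < (pvT s).length := by omega
      obtain ⟨v, hv⟩ : ∃ v, (pvT s)[i.toNat] = v := ⟨_, rfl⟩
      have hvt : v ∈ pvT s := hv ▸ List.getElem_mem hjlen
      have hvs : v ∈ s := (pvT_perm s).mem_iff.mp hvt
      have hM1 : i.toNat + 1 ≤ pvM s v := hv ▸ pvM_ge s i.toNat hjlen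
      have hM2 : pvM s v ≤ (pvT s).length := pvM_le_len s v
      have hpM : p ≤ (pvM s v : Int) := by omega
      have hcA : pvCA p s v = false := by
        simp only [pvCA, decide_eq_false_iff_not, not_lt, hlenp v]
        omega
      have hRA := A2 v ((PySem.Set.mem_ofList s v).mpr hvs) hcA
      have hgA : pvGA p s v = v * p - (pvS s (pvM s v) - pvS s (pvM s v - p.toNat)) := by
        rw [pvGA, pv_sum_slice s v p hp hpM]
      have hwin := pv_window_mono s p.toNat (pvM s v - (i.toNat + 1)) (i.toNat + 1 - p.toNat)
        (by omega)
      have ha1 : i.toNat + 1 - p.toNat + p.toNat = i.toNat + 1 := by omega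
      have ha2 : i.toNat + 1 - p.toNat + (pvM s v - (i.toNat + 1)) + p.toNat = pvM s v := by omega
      have ha3 : i.toNat + 1 - p.toNat + (pvM s v - (i.toNat + 1)) = pvM s v - p.toNat := by omega
      rw [ha1, ha2, ha3] at hwin
      have hgB : pvGB p s i = v * p - (pvS s (i.toNat + 1) - pvS s (i.toNat + 1 - p.toNat)) := by
        rw [pvGB_eval s p i hp hi1 (by omega), hv]
      calc List.foldl (fun acc v => if pvCA p s v then acc else min acc (pvGA p s v))
            (10000 * 10 ^ 5) (PySem.Set.ofList s) ≤ pvGA p s v := hRA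
        _ ≤ pvGB p s i := by rw [hgA, hgB]; omega
  · -- B's result ≤ A's result
    rcases A3 with hA | ⟨v, hv, hcA, hA⟩
    · rw [hA]; exact B1
    · rw [hA]
      have hvs : v ∈ s := (PySem.Set.mem_ofList s v).mp hv
      have hvt : v ∈ pvT s := (pvT_perm s).mem_iff.mpr hvs
      have hM1 : 1 ≤ pvM s v := pvM_pos s v hvt
      have hM2 : pvM s v ≤ (pvT s).length := pvM_le_len s v
      have hpM : p ≤ (pvM s v : Int) := by
        have := hlenp v
        simp only [pvCA, decide_eq_false_iff_not, not_lt] at hcA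
        omega
      have hgA : pvGA p s v = v * p - (pvS s (pvM s v) - pvS s (pvM s v - p.toNat)) := by
        rw [pvGA, pv_sum_slice s v p hp hpM]
      have hmem : ((pvM s v : Int) - 1) ∈ PySem.List.pyRange (p - 1) ((pvT s).length : Int) := by
        rw [PySem.List.mem_pyRange_one]
        constructor <;> [omega; omega]
      have hgB : pvGB p s ((pvM s v : Int) - 1)
          = v * p - (pvS s (pvM s v) - pvS s (pvM s v - p.toNat)) := by
        have et : ((pvM s v : Int) - 1).toNat = pvM s v - 1 := by omega
        rw [pvGB_eval s p _ hp (by omega) (by omega)]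
        simp only [et]
        have e3 : pvM s v - 1 + 1 = pvM s v := by omega
        rw [e3]
        congr 2
        · -- getElem value is v
          have := pvT_getElem_M s v hvt
          simpa using this
      have hRB := B2 _ hmem rfl
      rw [hgB] at hRB
      rw [hgA]
      exact hRB

-- ===== VERDICT (by name: the statement is the Claim_ definition above) =====
theorem solve_spec : Claim_equal_solve := by
  intro n p s _ hpre
  unfold Spec_solve
  exact pv_main n p s hpre
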